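-- pv_equiv track=rewrite | github.com/netheril96/stock_test | main.py | mm_actions
-- ===== SOURCE A (Python) =====
-- def mm_actions(prices, mm):
--     assert len(prices) == len(mm)
--     result = []
--     last_buy = None
--
--     for p, m in zip(prices, mm):
--         if p >= m and last_buy is None:
--             last_buy = p
--         elif p < m and last_buy is not None:
--             result.append((last_buy, p))
--             last_buy = None
--     return result
-- ===== SOURCE B (Python) =====
-- def mm_actions(prices, mm):
--     assert len(prices) == len(mm)
--     pairs = list(zip(prices, mm))
--     # pass 1: collapse into runs of consecutive equal sign (p >= m),
--     # keeping each run's first price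
--     runs = []
--     i = 0
--     while i < len(pairs):
--         p, m = pairs[i]
--         k = p >= m
--         runs.append((k, p))
--         while i < len(pairs) and (pairs[i][0] >= pairs[i][1]) == k:
--             i += 1
--     # pass 2: pair run starts with a flat/holding state machine
--     result = []
--     last_buy = None
--     for k, p in runs:
--         if k:
--             if last_buy is None:
--                 last_buy = p
--         elif last_buy is not None:
--             result.append((last_buy, p))
--             last_buy = None
--     return result
-- ===== Notes on version B (the rewrite author's own statement) =====
-- stated objective: alternative
-- what changed: Replaces A's single per-element buy/sell state loop by a two-pass decomposition: first collapse zip(prices, mm) into runs of consecutive equal sign (p >= m) keeping each run's first price, then pair run starts with a flat/holding pass over the runs.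
import Mathlib
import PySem

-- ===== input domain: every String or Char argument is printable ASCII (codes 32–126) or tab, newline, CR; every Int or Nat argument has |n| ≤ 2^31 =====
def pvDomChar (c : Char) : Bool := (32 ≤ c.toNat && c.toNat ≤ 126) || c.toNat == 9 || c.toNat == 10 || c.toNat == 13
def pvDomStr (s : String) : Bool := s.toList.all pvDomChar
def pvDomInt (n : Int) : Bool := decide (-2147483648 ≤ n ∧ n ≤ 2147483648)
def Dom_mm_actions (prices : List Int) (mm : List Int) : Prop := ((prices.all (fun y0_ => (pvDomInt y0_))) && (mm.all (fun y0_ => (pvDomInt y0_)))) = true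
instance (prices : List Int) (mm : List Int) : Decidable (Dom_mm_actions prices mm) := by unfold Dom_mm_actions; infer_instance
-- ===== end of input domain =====

-- B replaces A's per-element buy/sell state loop by a two-pass decomposition
-- (collapse into sign runs, then pair run starts); same cost, return value proved equal.

-- ===== PORT A =====
-- A's loop over zip(prices, mm): state = (result so far, last_buy : Option Int)
def loopA : List (Int × Int) → List (Int × Int) → Option Int → List (Int × Int)
  | [], res, _ => res
  | (p, m) :: t, res, lb =>
    match lb with
    | none => if p ≥ m then loopA t res (some p) else loopA t res none
    | some b => if p < m then loopA t (res ++ [(b, p)]) none else loopA t res (some b)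

def mm_actions (prices : List Int) (mm : List Int) : List (Int × Int) :=
  loopA (prices.zip mm) [] none

-- ===== PORT B =====
-- pass 1 of Source B: collapse zip(prices, mm) into runs of consecutive equal sign
-- (p ≥ m), keeping each run's first price (the inner while skipping a run is
-- the dropWhile)
def runsB : List (Int × Int) → List (Bool × Int)
  | [] => []
  | (p, m) :: t =>
    let k : Bool := decide (p ≥ m)
    (k, p) :: runsB (t.dropWhile (fun q => decide (q.1 ≥ q.2) == k))
termination_by l => l.length
decreasing_by
  have := List.length_dropWhile_le (fun q => decide (q.1 ≥ q.2) == k) t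
  simp; omega

-- pass 2 of Source B: flat/holding state machine over the runs
def loopB : List (Bool × Int) → List (Int × Int) → Option Int → List (Int × Int)
  | [], res, _ => res
  | (k, p) :: t, res, lb =>
    if k then
      match lb with
      | none => loopB t res (some p)
      | some b => loopB t res (some b)
    else
      match lb with
      | some b => loopB t (res ++ [(b, p)]) none
      | none => loopB t res none

def mm_actions_alt (prices : List Int) (mm : List Int) : List (Int × Int) :=
  loopB (runsB (prices.zip mm)) [] none

-- ===== PRECONDITION & SPEC =====
-- A (and B) assert len(prices) == len(mm): unequal lengths raise AssertionError.
def Pre_mm_actions (prices : List Int) (mm : List Int) : Prop := prices.length = mm.length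
instance (prices : List Int) (mm : List Int) : Decidable (Pre_mm_actions prices mm) := by unfold Pre_mm_actions; infer_instance
def pvWitness_mm_actions : List Int × List Int := ([1, 0, 3], [0, 2, 1])

def Spec_mm_actions (prices : List Int) (mm : List Int) (out : List (Int × Int)) : Prop := out = mm_actions_alt prices mm
instance (prices : List Int) (mm : List Int) (out : List (Int × Int)) : Decidable (Spec_mm_actions prices mm out) := by unfold Spec_mm_actions; infer_instance

-- ===== CLAIM (what is proved, stated in full; the proofs are below) =====
def Claim_equal_mm_actions : Prop := ∀ (prices : List Int) (mm : List Int), Dom_mm_actions prices mm → Pre_mm_actions prices mm → Spec_mm_actions prices mm (mm_actions prices mm)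

-- ===== LEMMAS AND PROOFS =====

-- step equations for A's loop
theorem loopA_cons_ge_none (p m : Int) (t res : List (Int × Int)) (h : p ≥ m) :
    loopA ((p, m) :: t) res none = loopA t res (some p) := by simp [loopA, h]
theorem loopA_cons_lt_none (p m : Int) (t res : List (Int × Int)) (h : ¬ p ≥ m) :
    loopA ((p, m) :: t) res none = loopA t res none := by simp [loopA, h]
theorem loopA_cons_ge_some (p m b : Int) (t res : List (Int × Int)) (h : ¬ p < m) :
    loopA ((p, m) :: t) res (some b) = loopA t res (some b) := by simp [loopA, h]
theorem loopA_cons_lt_some (p m b : Int) (t res : List (Int × Int)) (h : p < m) :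
    loopA ((p, m) :: t) res (some b) = loopA t (res ++ [(b, p)]) none := by simp [loopA, h]

-- step equations for B's run-pairing loop
theorem loopB_cons_true_none (p : Int) (t : List (Bool × Int)) (res : List (Int × Int)) :
    loopB ((true, p) :: t) res none = loopB t res (some p) := rfl
theorem loopB_cons_true_some (p b : Int) (t : List (Bool × Int)) (res : List (Int × Int)) :
    loopB ((true, p) :: t) res (some b) = loopB t res (some b) := rfl
theorem loopB_cons_false_some (p b : Int) (t : List (Bool × Int)) (res : List (Int × Int)) :
    loopB ((false, p) :: t) res (some b) = loopB t (res ++ [(b, p)]) none := rfl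
theorem loopB_cons_false_none (p : Int) (t : List (Bool × Int)) (res : List (Int × Int)) :
    loopB ((false, p) :: t) res none = loopB t res none := rfl

-- elements with sign True are absorbed while holding
theorem loopA_skip_true (pre : List (Int × Int)) (rest : List (Int × Int))
    (res : List (Int × Int)) (b : Int) (h : ∀ q ∈ pre, q.1 ≥ q.2) :
    loopA (pre ++ rest) res (some b) = loopA rest res (some b) := by
  induction pre with
  | nil => rfl
  | cons q t ih =>
    obtain ⟨p, m⟩ := q
    have hq : p ≥ m := h (p, m) (List.mem_cons_self)
    rw [List.cons_append, loopA_cons_ge_some _ _ _ _ _ (by omega)]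
    exact ih (fun q hq => h q (List.mem_cons_of_mem _ hq))

-- elements with sign False are absorbed while flat
theorem loopA_skip_false (pre : List (Int × Int)) (rest : List (Int × Int))
    (res : List (Int × Int)) (h : ∀ q ∈ pre, q.1 < q.2) :
    loopA (pre ++ rest) res none = loopA rest res none := by
  induction pre with
  | nil => rfl
  | cons q t ih =>
    obtain ⟨p, m⟩ := q
    have hq : p < m := h (p, m) (List.mem_cons_self)
    rw [List.cons_append, loopA_cons_lt_none _ _ _ _ (by omega)]
    exact ih (fun q hq => h q (List.mem_cons_of_mem _ hq))

theorem loopA_eq_loopB : ∀ (l : List (Int × Int)) (res : List (Int × Int)) (lb : Option Int),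
    loopA l res lb = loopB (runsB l) res lb
  | [], res, lb => by simp [loopA, runsB, loopB]
  | (p, m) :: t, res, lb => by
    have hrec := loopA_eq_loopB (t.dropWhile (fun q => decide (q.1 ≥ q.2) == decide (p ≥ m)))
    have hsplit := List.takeWhile_append_dropWhile
      (p := fun q : Int × Int => decide (q.1 ≥ q.2) == decide (p ≥ m)) (l := t)
    rw [runsB]
    by_cases hk : p ≥ m
    · have hkd : decide (p ≥ m) = true := by simp [hk]
      rw [hkd] at hrec hsplit ⊢
      have hmem : ∀ q ∈ t.takeWhile (fun q => decide (q.1 ≥ q.2) == true), q.1 ≥ q.2 := by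
        intro q hq
        have := List.mem_takeWhile_imp hq
        simpa using this
      cases lb with
      | none =>
        rw [loopA_cons_ge_none _ _ _ _ hk, loopB_cons_true_none,
          ← hsplit, loopA_skip_true _ _ _ _ hmem, hrec, hsplit]
      | some b =>
        rw [loopA_cons_ge_some _ _ _ _ _ (by omega), loopB_cons_true_some,
          ← hsplit, loopA_skip_true _ _ _ _ hmem, hrec, hsplit]
    · have hkd : decide (p ≥ m) = false := by simp [hk]
      rw [hkd] at hrec hsplit ⊢
      have hmem : ∀ q ∈ t.takeWhile (fun q => decide (q.1 ≥ q.2) == false), q.1 < q.2 := by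
        intro q hq
        have := List.mem_takeWhile_imp hq
        simp at this
        omega
      cases lb with
      | none =>
        rw [loopA_cons_lt_none _ _ _ _ hk, loopB_cons_false_none,
          ← hsplit, loopA_skip_false _ _ _ hmem, hrec, hsplit]
      | some b =>
        rw [loopA_cons_lt_some _ _ _ _ _ (by omega), loopB_cons_false_some,
          ← hsplit, loopA_skip_false _ _ _ hmem, hrec, hsplit]
termination_by l => l.length
decreasing_by
  all_goals
    have := List.length_dropWhile_le (fun q : Int × Int => decide (q.1 ≥ q.2) == decide (p ≥ m)) t
    simp; omega

-- ===== VERDICT (by name: the statement is the Claim_ definition above) =====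
theorem mm_actions_spec : Claim_equal_mm_actions := by
  intro prices mm _ _
  unfold Spec_mm_actions mm_actions mm_actions_alt
  exact loopA_eq_loopB _ _ _
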